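-- pv_equiv track=rewrite | github.com/kachok/number_gossip | index.py | undulating
-- ===== SOURCE A (Python) =====
-- def undulating(number):
--     """ Returns True if number is undulating """
--     if number < 100:
--         return False
--     number = str(number)
--     for idx in range(len(number)-2):
--         if number[idx] != number[idx+2]:
--             return False
--
--     return True
-- ===== SOURCE B (Python) =====
-- def undulating(number):
--     """ Returns True if number is undulating """
--     if number < 100:
--         return False
--     s = str(number)
--     return len(set(s[0::2])) == 1 and len(set(s[1::2])) == 1
-- ===== Notes on version B (the rewrite author's own statement) =====
-- stated objective: simpler
-- what changed: Replaces A's pairwise index loop (s[i] == s[i+2] for every i) with two stride-2 slices and set-uniformity checks: all even-position digits equal and all odd-position digits equal.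
import Mathlib
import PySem

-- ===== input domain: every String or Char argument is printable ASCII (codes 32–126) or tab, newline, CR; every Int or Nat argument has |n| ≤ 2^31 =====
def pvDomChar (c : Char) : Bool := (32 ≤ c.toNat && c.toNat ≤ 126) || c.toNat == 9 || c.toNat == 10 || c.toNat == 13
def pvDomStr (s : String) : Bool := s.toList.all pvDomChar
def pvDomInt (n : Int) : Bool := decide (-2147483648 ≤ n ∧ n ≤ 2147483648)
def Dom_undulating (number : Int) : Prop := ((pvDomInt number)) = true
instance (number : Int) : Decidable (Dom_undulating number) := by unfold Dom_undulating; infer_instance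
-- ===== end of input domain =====

-- B replaces A's pairwise index loop with two stride-2 slices and set-uniformity checks (same cost, simpler).

-- ===== PORT A =====
def undulating (number : Int) : Bool :=
  if number < 100 then false
  else
    let s := PySem.Int.toChars number
    (PySem.List.pyRange 0 ((s.length : Int) - 2) 1).all
      (fun idx => PySem.List.pyGet? s idx == PySem.List.pyGet? s (idx + 2))

-- ===== PORT B =====
def undulating_alt (number : Int) : Bool :=
  if number < 100 then false
  else
    let s := PySem.Int.toChars number
    -- s[0::2] and s[1::2]; the step is 2 ≠ 0 so slice? is always `some` and the getD default never fires
    let ev := (PySem.List.slice? s none none 2).getD []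
    let od := (PySem.List.slice? s (some 1) none 2).getD []
    (PySem.Set.len (PySem.Set.ofList ev) == 1) && (PySem.Set.len (PySem.Set.ofList od) == 1)

-- ===== PRECONDITION & SPEC =====
def Spec_undulating (number : Int) (out : Bool) : Prop := out = undulating_alt number
instance (number : Int) (out : Bool) : Decidable (Spec_undulating number out) := by unfold Spec_undulating; infer_instance

-- ===== CLAIM (what is proved, stated in full; the proofs are below) =====
def Claim_equal_undulating : Prop := ∀ (number : Int), Dom_undulating number → Spec_undulating number (undulating number)

-- ===== LEMMAS AND PROOFS =====

-- proof-side helper: xs[0::2] as a structural recursion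
def everyOther {α : Type} : List α → List α
  | [] => []
  | [a] => [a]
  | a :: _ :: t => a :: everyOther t

theorem eo_cons {α : Type} (x : α) (r : List α) :
    everyOther (x :: r) = x :: everyOther r.tail := by
  cases r <;> simp [everyOther]

theorem eo_filterMap {α : Type} : ∀ (xs : List α),
    (List.range ((xs.length + 1) / 2)).filterMap (fun k => xs[2 * k]?) = everyOther xs := by
  intro xs
  induction xs using everyOther.induct with
  | case1 => simp [everyOther]
  | case2 a => simp [everyOther]
  | case3 a b t ih =>
    have hlen : ((a :: b :: t).length + 1) / 2 = (t.length + 1) / 2 + 1 := by simp; omega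
    rw [hlen, List.range_succ_eq_map, List.filterMap_cons, List.filterMap_map]
    simp only [Function.comp_def]
    simp only [show ∀ k, 2 * Nat.succ k = 2 * k + 1 + 1 from fun k => by omega]
    simp [everyOther, ← ih]

-- s[0::2] = everyOther s
theorem slice_even {α : Type} (xs : List α) :
    PySem.List.slice? xs none none 2 = some (everyOther xs) := by
  rw [← eo_filterMap]
  simp only [PySem.List.slice?, PySem.List.sliceIndices]
  norm_num
  have h1 : (if 0 < xs.length then (((xs.length : Int) + 2 - 1) / 2).toNat else 0) = (xs.length + 1) / 2 := by
    split <;> omega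
  have h2 : (fun x : Nat => xs[(2 * (x : Int)).toNat]?) = (fun k : Nat => xs[2 * k]?) := by
    funext k
    have : (2 * (k : Int)).toNat = 2 * k := by omega
    rw [this]
  rw [h1, h2]

-- s[1::2] = everyOther s.tail
theorem slice_odd {α : Type} (xs : List α) :
    PySem.List.slice? xs (some 1) none 2 = some (everyOther xs.tail) := by
  cases xs with
  | nil => rfl
  | cons a t =>
    simp only [PySem.List.slice?, PySem.List.sliceIndices]
    norm_num
    have h1 : (if 0 < t.length then (((t.length : Int) + 2 - 1) / 2).toNat else 0)
        = (t.length + 1) / 2 := by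
      split <;> omega
    have h2 : (fun x : Nat => (a :: t)[(1 + 2 * (x : Int)).toNat]?) = (fun k : Nat => t[2 * k]?) := by
      funext k
      have : (1 + 2 * (k : Int)).toNat = 2 * k + 1 := by omega
      rw [this]
      simp
    rw [h1, h2, eo_filterMap]

theorem nodup_all_eq_singleton {α : Type} {l : List α} {a : α}
    (hn : l.Nodup) (ha : a ∈ l) (h : ∀ b ∈ l, b = a) : l = [a] := by
  match l with
  | [] => cases ha
  | b :: t =>
    have hb : b = a := h b (by simp)
    subst hb
    have ht : t = [] := by
      cases t with
      | nil => rfl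
      | cons c t' =>
        have hc : c = b := h c (by simp)
        subst hc
        simp at hn
    simp [ht]

theorem ofList_eq_singleton_iff {α : Type} [BEq α] [LawfulBEq α] (xs : List α) (a : α) :
    PySem.Set.ofList xs = [a] ↔ ∀ z, z ∈ xs ↔ z = a := by
  constructor
  · intro h z
    rw [← PySem.Set.mem_ofList xs z, h, List.mem_singleton]
  · intro h
    exact nodup_all_eq_singleton (PySem.Set.nodup_ofList xs)
      ((PySem.Set.mem_ofList xs a).2 ((h a).2 rfl))
      (fun b hb => (h b).1 ((PySem.Set.mem_ofList xs b).1 hb))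

theorem setlen_one_iff {α : Type} [BEq α] [LawfulBEq α] (xs : List α) :
    (PySem.Set.ofList xs).length = 1 ↔ ∃ a, ∀ z, z ∈ xs ↔ z = a := by
  rw [List.length_eq_one_iff]
  exact ⟨fun ⟨a, h⟩ => ⟨a, (ofList_eq_singleton_iff xs a).1 h⟩,
         fun ⟨a, h⟩ => ⟨a, (ofList_eq_singleton_iff xs a).2 h⟩⟩

theorem setlen_cons_cons {α : Type} [BEq α] [LawfulBEq α] (x y : α) (r : List α) :
    (PySem.Set.len (PySem.Set.ofList (x :: y :: r)) == 1)
      = ((x == y) && (PySem.Set.len (PySem.Set.ofList (y :: r)) == 1)) := by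
  rw [Bool.eq_iff_iff]
  simp only [Bool.and_eq_true, beq_iff_eq, PySem.Set.len, Nat.cast_eq_one, setlen_one_iff]
  constructor
  · rintro ⟨a, h⟩
    have hx : x = a := (h x).1 (by simp)
    have hy : y = a := (h y).1 (by simp)
    refine ⟨hx.trans hy.symm, a, fun z => ⟨fun hz => (h z).1 (List.mem_cons_of_mem x hz), fun hz => ?_⟩⟩
    subst hz
    rw [← hy]
    exact List.mem_cons_self
  · rintro ⟨hxy, a, h⟩
    have hy : y = a := (h y).1 (by simp)
    refine ⟨a, fun z => ⟨fun hz => ?_, fun hz => List.mem_cons_of_mem x ((h z).2 hz)⟩⟩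
    rcases List.mem_cons.1 hz with h1 | h2
    · exact h1 ▸ hxy.trans hy
    · exact (h z).1 h2

theorem setlen_singleton {α : Type} [BEq α] [LawfulBEq α] (a : α) :
    (PySem.Set.len (PySem.Set.ofList [a]) == 1) = true := by
  simp only [PySem.Set.len, beq_iff_eq, Nat.cast_eq_one, setlen_one_iff]
  exact ⟨a, fun z => by simp⟩

-- A's loop over an arbitrary digit list
def gapAll {α : Type} [BEq α] (l : List α) : Bool :=
  (PySem.List.pyRange 0 ((l.length : Int) - 2) 1).all
    (fun idx => PySem.List.pyGet? l idx == PySem.List.pyGet? l (idx + 2))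

-- B's body over an arbitrary digit list
def uniSlices {α : Type} [BEq α] (l : List α) : Bool :=
  (PySem.Set.len (PySem.Set.ofList (everyOther l)) == 1)
    && (PySem.Set.len (PySem.Set.ofList (everyOther l.tail)) == 1)

theorem gapAll_step {α : Type} [BEq α] [LawfulBEq α] (a b c : α) (t : List α) :
    gapAll (a :: b :: c :: t) = ((a == c) && gapAll (b :: c :: t)) := by
  simp only [gapAll, List.length_cons]
  have e1 : ((t.length + 1 + 1 + 1 : Nat) : Int) - 2 = ((t.length + 1 : Nat) : Int) := by push_cast; ring
  have e2 : ((t.length + 1 + 1 : Nat) : Int) - 2 = ((t.length : Nat) : Int) := by push_cast; ring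
  rw [e1, e2, PySem.List.pyRange_one 0, PySem.List.pyRange_one 0]
  rw [show ((t.length + 1 : Nat) : Int) - 0 = ((t.length + 1 : Nat) : Int) by ring,
      show ((t.length : Nat) : Int) - 0 = ((t.length : Nat) : Int) by ring]
  rw [Int.toNat_natCast, Int.toNat_natCast, List.range_succ_eq_map]
  simp only [List.map_cons, List.all_cons, List.map_map, List.all_map]
  congr 1
  · norm_num
    rw [show (2 : Int) = ((2 : Nat) : Int) from rfl, PySem.List.pyGet?_natCast]
    simp
  · congr 1
    funext k
    show (PySem.List.pyGet? (a :: b :: c :: t) (0 + ((Nat.succ k : Nat) : Int)) ==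
            PySem.List.pyGet? (a :: b :: c :: t) (0 + ((Nat.succ k : Nat) : Int) + 2))
       = (PySem.List.pyGet? (b :: c :: t) (0 + ((k : Nat) : Int)) ==
            PySem.List.pyGet? (b :: c :: t) (0 + ((k : Nat) : Int) + 2))
    have h1 : (0 : Int) + ((Nat.succ k : Nat) : Int) = ((k + 1 : Nat) : Int) := by push_cast; ring
    rw [h1]
    have h2 : ((k + 1 : Nat) : Int) + 2 = ((k + 3 : Nat) : Int) := by push_cast; ring
    rw [h2]
    have h3 : (0 : Int) + ((k : Nat) : Int) = ((k : Nat) : Int) := by ring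
    rw [h3]
    have h4 : ((k : Nat) : Int) + 2 = ((k + 2 : Nat) : Int) := by push_cast; ring
    rw [h4]
    rw [PySem.List.pyGet?_natCast, PySem.List.pyGet?_natCast,
        PySem.List.pyGet?_natCast, PySem.List.pyGet?_natCast]
    simp [show ∀ n : Nat, n + 3 = n + 1 + 1 + 1 from fun n => rfl,
          show ∀ n : Nat, n + 2 = n + 1 + 1 from fun n => rfl]

theorem uniSlices_step {α : Type} [BEq α] [LawfulBEq α] (a b c : α) (t : List α) :
    uniSlices (a :: b :: c :: t) = ((a == c) && uniSlices (b :: c :: t)) := by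
  have h1 : everyOther (a :: b :: c :: t) = a :: c :: everyOther t.tail := by
    simp [everyOther, eo_cons]
  have h2 : everyOther (b :: c :: t) = b :: everyOther t := by
    simp [everyOther]
  simp only [uniSlices, List.tail_cons, h1, h2, eo_cons, setlen_cons_cons]
  rw [Bool.eq_iff_iff]
  simp only [Bool.and_eq_true, beq_iff_eq]
  tauto

theorem gapAll_two {α : Type} [BEq α] (a b : α) : gapAll [a, b] = true := by
  simp [gapAll, PySem.List.pyRange_one_eq_nil]

theorem main_lemma {α : Type} [BEq α] [LawfulBEq α] :
    ∀ (n : Nat) (l : List α), l.length ≤ n → 2 ≤ l.length → gapAll l = uniSlices l := by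
  intro n
  induction n with
  | zero => intro l h h2; omega
  | succ m ih =>
    intro l hlen h2
    match l with
    | [a, b] =>
      rw [gapAll_two]
      simp only [uniSlices, List.tail_cons]
      rw [show everyOther [a, b] = [a] from rfl, show everyOther [b] = [b] from rfl,
          setlen_singleton, setlen_singleton]
      rfl
    | a :: b :: c :: t =>
      rw [gapAll_step, uniSlices_step, ih (b :: c :: t) (by simpa using Nat.le_of_succ_le_succ hlen) (by simp)]

theorem toDigitsCore_len_lb :
    ∀ (fuel n : Nat) (l : List Char), 1 ≤ fuel →
      l.length + 1 ≤ (Nat.toDigitsCore 10 fuel n l).length := by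
  intro fuel
  induction fuel with
  | zero => intro n l h; omega
  | succ f ih =>
    intro n l _
    rw [Nat.toDigitsCore]
    split
    · simp
    · cases Nat.eq_zero_or_pos f with
      | inl h0 => subst h0; rw [Nat.toDigitsCore]; simp
      | inr hf =>
        calc l.length + 1 ≤ (l.length + 1) + 1 := by omega
          _ ≤ _ := ih (n / 10) ((n % 10).digitChar :: l) hf

theorem toChars_len_ge (number : Int) (h : 100 ≤ number) :
    2 ≤ (PySem.Int.toChars number).length := by
  have hn : ¬ number < 0 := by omega
  have h10 : 10 ≤ number.toNat := by omega
  simp only [PySem.Int.toChars, if_neg hn]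
  rw [Nat.toDigits, Nat.toDigitsCore]
  have hd : ¬ number.toNat / 10 = 0 := by omega
  rw [if_neg hd]
  have := toDigitsCore_len_lb number.toNat (number.toNat / 10)
    [(number.toNat % 10).digitChar] (by omega)
  simpa using this

-- ===== VERDICT (by name: the statement is the Claim_ definition above) =====
theorem undulating_spec : Claim_equal_undulating := by
  intro number _
  unfold Spec_undulating undulating undulating_alt
  by_cases h : number < 100
  · simp [h]
  · simp only [if_neg h]
    rw [slice_even, slice_odd]
    simp only [Option.getD_some]
    have hlen : 2 ≤ (PySem.Int.toChars number).length := toChars_len_ge number (by omega)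
    exact main_lemma (PySem.Int.toChars number).length _ le_rfl hlen
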